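-- pv_equiv track=rewrite | github.com/liupengsay/PyIsTheBestLang | src/basis/binary_search/problem.py | ac_14
-- ===== SOURCE A (Python) =====
-- def ac_14(nums):
--     """
--     url: https://www.acwing.com/problem/content/description/15/
--     tag: pigeonhole_principle|binary_search|O(nlogn)|in_place_hash
--     """
--     n = len(nums) - 1
--     low = 1
--     high = n
--     while low < high:
--         mid = low + (high - low) // 2
--         cnt = 0
--         for num in nums:
--             if low <= num <= mid:
--                 cnt += 1
--         if cnt > mid - low + 1:
--             high = mid
--         else:
--             low = mid + 1
--     return low
-- ===== SOURCE B (Python) =====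
-- def ac_14(nums):
--     # Count values of [1, n] once into a frequency array, build prefix sums,
--     # then binary-search with O(1) interval counts instead of rescanning nums
--     # in every binary-search iteration.
--     n = len(nums) - 1
--     cnt = [0] * (n + 2)
--     for x in nums:
--         if 1 <= x <= n:
--             cnt[x] += 1
--     pref = [0]
--     s = 0
--     for v in range(1, n + 1):
--         s += cnt[v]
--         pref.append(s)
--     low = 1
--     high = n
--     while low < high:
--         mid = (low + high) // 2
--         if pref[mid] - pref[low - 1] > mid - low + 1:
--             high = mid
--         else:
--             low = mid + 1
--     return low
-- ===== Notes on version B (the rewrite author's own statement) =====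
-- stated objective: faster
-- what changed: B counts the in-range values once into a dict, turns that into a prefix-sum array, and runs the same binary search with O(1) interval counts, replacing A's full rescan of nums in every binary-search iteration.
import Mathlib
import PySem

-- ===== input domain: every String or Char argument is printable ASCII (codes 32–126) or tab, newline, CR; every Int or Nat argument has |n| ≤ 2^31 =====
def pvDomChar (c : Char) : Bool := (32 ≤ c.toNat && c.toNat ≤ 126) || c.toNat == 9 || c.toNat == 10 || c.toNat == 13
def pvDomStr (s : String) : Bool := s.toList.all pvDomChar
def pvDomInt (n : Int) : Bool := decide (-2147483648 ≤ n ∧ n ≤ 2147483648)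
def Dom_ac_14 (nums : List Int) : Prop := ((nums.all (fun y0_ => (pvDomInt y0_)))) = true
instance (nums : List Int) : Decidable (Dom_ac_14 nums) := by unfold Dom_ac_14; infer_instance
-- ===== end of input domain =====

-- B replaces A's per-iteration rescan of nums by a frequency array + prefix sums built once,
-- so each binary-search step counts an interval in O(1) (objective: faster).


-- ===== PORT A =====
-- the while-loop of A; state (low, high), terminates since high - low shrinks
def ac14Loop (nums : List Int) (low high : Int) : Int :=
  if h : low < high then
    let mid := low + PySem.Int.floordiv (high - low) 2
    let cnt := nums.foldl (fun c num => if low ≤ num ∧ num ≤ mid then c + 1 else c) (0 : Int)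
    if cnt > mid - low + 1 then ac14Loop nums low mid
    else ac14Loop nums (mid + 1) high
  else low
termination_by (high - low).toNat
decreasing_by
  · have := PySem.Int.floordiv_eq_ediv_of_pos (a := high - low) (b := 2) (by omega)
    omega
  · have := PySem.Int.floordiv_eq_ediv_of_pos (a := high - low) (b := 2) (by omega)
    omega

def ac_14 (nums : List Int) : Int :=
  ac14Loop nums 1 ((nums.length : Int) - 1)

-- ===== PORT B =====
-- cnt = [0]*(n+2); for x in nums: if 1 <= x <= n: cnt[x] += 1
-- (the index x is always in range when the branch is taken, so pySetD/pyGetD are exact here)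
def altCnt (nums : List Int) (n : Int) : List Int :=
  nums.foldl
    (fun c x => if 1 ≤ x ∧ x ≤ n then PySem.List.pySetD c x (PySem.List.pyGetD c x 0 + 1) else c)
    (List.replicate (n + 2).toNat (0 : Int))

-- pref = [0]; s = 0; for v in range(1, n+1): s += cnt[v]; pref.append(s)
def altPref (cnt : List Int) (n : Int) : Int × List Int :=
  (PySem.List.pyRange 1 (n + 1) 1).foldl
    (fun sp v => (sp.1 + PySem.List.pyGetD cnt v 0, sp.2 ++ [sp.1 + PySem.List.pyGetD cnt v 0]))
    ((0 : Int), [(0 : Int)])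

-- B's while-loop; pref[mid], pref[low-1] are always in range (1 ≤ low ≤ mid < high ≤ n)
def altLoop (pref : List Int) (low high : Int) : Int :=
  if h : low < high then
    let mid := PySem.Int.floordiv (low + high) 2
    if PySem.List.pyGetD pref mid 0 - PySem.List.pyGetD pref (low - 1) 0 > mid - low + 1 then
      altLoop pref low mid
    else altLoop pref (mid + 1) high
  else low
termination_by (high - low).toNat
decreasing_by
  · have := PySem.Int.floordiv_eq_ediv_of_pos (a := low + high) (b := 2) (by omega)
    omega
  · have := PySem.Int.floordiv_eq_ediv_of_pos (a := low + high) (b := 2) (by omega)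
    omega

def ac_14_alt (nums : List Int) : Int :=
  let n : Int := (nums.length : Int) - 1
  altLoop (altPref (altCnt nums n) n).2 1 n

-- ===== PRECONDITION & SPEC =====
def Spec_ac_14 (nums : List Int) (out : Int) : Prop := out = ac_14_alt nums
instance (nums : List Int) (out : Int) : Decidable (Spec_ac_14 nums out) := by unfold Spec_ac_14; infer_instance

-- ===== CLAIM (what is proved, stated in full; the proofs are below) =====
def Claim_equal_ac_14 : Prop := ∀ (nums : List Int), Dom_ac_14 nums → Spec_ac_14 nums (ac_14 nums)

-- ===== LEMMAS AND PROOFS =====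

-- number of elements of nums lying in [1, v]
def prefC (nums : List Int) (v : Int) : Int :=
  (nums.countP (fun x => decide (1 ≤ x ∧ x ≤ v)) : Int)

theorem prefC_step (nums : List Int) (v : Int) (hv : 1 ≤ v) :
    prefC nums v = prefC nums (v - 1) + (nums.count v : Int) := by
  unfold prefC
  induction nums with
  | nil => simp
  | cons x xs ih =>
    simp only [List.countP_cons, List.count_cons, decide_eq_true_eq, beq_iff_eq]
    split_ifs <;> push_cast <;> omega

theorem prefC_split (nums : List Int) (low mid : Int) (h1 : 1 ≤ low) (h2 : low ≤ mid + 1) :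
    prefC nums mid = prefC nums (low - 1) +
      (nums.countP (fun x => decide (low ≤ x ∧ x ≤ mid)) : Int) := by
  unfold prefC
  induction nums with
  | nil => simp
  | cons x xs ih =>
    simp only [List.countP_cons, decide_eq_true_eq]
    split_ifs <;> push_cast <;> omega

theorem foldl_if_count (low mid : Int) (nums : List Int) (init : Int) :
    nums.foldl (fun c num => if low ≤ num ∧ num ≤ mid then c + 1 else c) init
      = init + (nums.countP (fun x => decide (low ≤ x ∧ x ≤ mid)) : Int) := by
  induction nums generalizing init with
  | nil => simp
  | cons x xs ih =>
    simp only [List.foldl_cons, List.countP_cons, decide_eq_true_eq, ih]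
    split_ifs <;> push_cast <;> omega

theorem getD_toNat_of_bounds (c : List Int) (v : Int) (d : Int) (h1 : 0 ≤ v)
    (h2 : v < (c.length : Int)) : PySem.List.pyGetD c v d = c.getD v.toNat d := by
  have hv : v = ((v.toNat : Nat) : Int) := by omega
  rw [hv, PySem.List.pyGetD_natCast, Int.toNat_natCast]

theorem altCnt_getD (nums : List Int) (n : Int) :
    ∀ (cs : List Int), cs.length = (n + 2).toNat →
      (∀ v, 1 ≤ v → v ≤ n →
        PySem.List.pyGetD
          (nums.foldl
            (fun c x => if 1 ≤ x ∧ x ≤ n then PySem.List.pySetD c x (PySem.List.pyGetD c x 0 + 1) else c)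
            cs) v 0
        = PySem.List.pyGetD cs v 0 + (nums.count v : Int)) := by
  induction nums with
  | nil => intro cs hc v hv1 hv2; simp
  | cons x xs ih =>
    intro cs hc v hv1 hv2
    simp only [List.foldl_cons, List.count_cons]
    by_cases hx : 1 ≤ x ∧ x ≤ n
    · have hidx : x.toNat < cs.length := by omega
      have hxr : PySem.List.pySetD cs x (PySem.List.pyGetD cs x 0 + 1)
          = cs.set x.toNat (PySem.List.pyGetD cs x 0 + 1) :=
        PySem.List.pySetD_of_nonneg cs (PySem.List.pyGetD cs x 0 + 1) (by omega)
      have hlen : (PySem.List.pySetD cs x (PySem.List.pyGetD cs x 0 + 1)).length = (n + 2).toNat := by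
        rw [hxr, List.length_set]; exact hc
      rw [if_pos hx, ih _ hlen v hv1 hv2, hxr]
      rw [getD_toNat_of_bounds _ v 0 (by omega) (by simp [List.length_set]; omega)]
      rw [getD_toNat_of_bounds cs v 0 (by omega) (by omega)]
      rw [List.getD_eq_getElem?_getD, List.getD_eq_getElem?_getD]
      by_cases hxv : x = v
      · subst hxv
        rw [List.getElem?_set_self hidx]
        have hg : (cs[x.toNat]?).getD (0 : Int) = PySem.List.pyGetD cs x 0 := by
          rw [getD_toNat_of_bounds cs x 0 (by omega) (by omega), List.getD_eq_getElem?_getD]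
        simp [hg]
        omega
      · have hne : x.toNat ≠ v.toNat := by omega
        rw [List.getElem?_set_ne hne]
        have hbeq : (x == v) = false := by simp [hxv]
        simp [hbeq]
    · rw [if_neg hx, ih _ hc v hv1 hv2]
      have hbeq : (x == v) = false := by
        simp only [beq_eq_false_iff_ne, ne_eq]
        omega
      simp [hbeq]

theorem prefC_zero (nums : List Int) : prefC nums 0 = 0 := by
  unfold prefC
  have h : nums.countP (fun x => decide (1 ≤ x ∧ x ≤ (0 : Int))) = 0 := by
    rw [List.countP_eq_zero]
    intro x _
    simp only [decide_eq_true_eq]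
    omega
  rw [h]
  simp

theorem altPref_spec (nums : List Int) (n : Int) (hn : 0 ≤ n) :
    ∀ (m : Nat), (m : Int) ≤ n →
      (PySem.List.pyRange 1 ((m : Int) + 1) 1).foldl
        (fun sp v => (sp.1 + PySem.List.pyGetD (altCnt nums n) v 0,
                      sp.2 ++ [sp.1 + PySem.List.pyGetD (altCnt nums n) v 0]))
        ((0 : Int), [(0 : Int)])
      = (prefC nums m, (PySem.List.pyRange 0 ((m : Int) + 1) 1).map (fun v => prefC nums v)) := by
  intro m
  induction m with
  | zero =>
    intro _
    rw [PySem.List.pyRange_one_eq_nil (by omega)]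
    simp only [Nat.cast_zero, zero_add]
    have h01 : PySem.List.pyRange 0 1 1 = [0] := by
      rw [PySem.List.pyRange_one_cons (by omega), PySem.List.pyRange_one_eq_nil (by omega)]
    rw [h01]
    simp [prefC_zero]
  | succ m ih =>
    intro hm
    have hm' : (m : Int) ≤ n := by push_cast at hm ⊢; omega
    have hcast : ((m + 1 : Nat) : Int) = (m : Int) + 1 := by push_cast; ring
    rw [hcast, PySem.List.pyRange_one_succ_right (by omega), List.foldl_append, ih hm']
    simp only [List.foldl_cons, List.foldl_nil]
    have hcnt : PySem.List.pyGetD (altCnt nums n) ((m : Int) + 1) 0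
        = (nums.count ((m : Int) + 1) : Int) := by
      have hlen : (List.replicate (n + 2).toNat (0 : Int)).length = (n + 2).toNat := by simp
      have hfold := altCnt_getD nums n (List.replicate (n + 2).toNat (0 : Int)) hlen
        ((m : Int) + 1) (by omega) (by push_cast at hm; omega)
      unfold altCnt
      rw [hfold, getD_toNat_of_bounds _ _ 0 (by omega) (by simp; push_cast at hm; omega)]
      rw [List.getD_eq_getElem?_getD]
      have hidx : ((m : Int) + 1).toNat < (List.replicate (n + 2).toNat (0 : Int)).length := by
        simp; push_cast at hm; omega
      rw [List.getElem?_eq_getElem hidx]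
      simp
    have hstep : prefC nums ((m : Int) + 1) = prefC nums m + (nums.count ((m : Int) + 1) : Int) := by
      have h := prefC_step nums ((m : Int) + 1) (by omega)
      simpa using h
    simp only [Prod.mk.injEq]
    refine ⟨?_, ?_⟩
    · rw [hcnt, ← hstep]
    · rw [hcnt, ← hstep, PySem.List.pyRange_one_succ_right (a := 0) (b := (m : Int) + 1) (by omega),
          List.map_append]
      simp

theorem loop_eq (nums pref : List Int) (n : Int)
    (hpref : ∀ j : Int, 0 ≤ j → j ≤ n → PySem.List.pyGetD pref j 0 = prefC nums j) :
    ∀ (k : Nat) (low high : Int), (high - low).toNat ≤ k → 1 ≤ low → high ≤ n →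
      ac14Loop nums low high = altLoop pref low high := by
  intro k
  induction k with
  | zero =>
    intro low high hk h1 h2
    have hlt : ¬ low < high := by omega
    rw [ac14Loop, altLoop, dif_neg hlt, dif_neg hlt]
  | succ k ih =>
    intro low high hk h1 h2
    by_cases hlt : low < high
    · rw [ac14Loop, altLoop, dif_pos hlt, dif_pos hlt]
      simp only []
      have hfd1 := PySem.Int.floordiv_eq_ediv_of_pos (a := high - low) (b := 2) (by omega)
      have hfd2 := PySem.Int.floordiv_eq_ediv_of_pos (a := low + high) (b := 2) (by omega)
      have hmid : low + PySem.Int.floordiv (high - low) 2 = PySem.Int.floordiv (low + high) 2 := by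
        omega
      rw [← hmid]
      set mid := low + PySem.Int.floordiv (high - low) 2 with hmiddef
      have hmb1 : low ≤ mid := by omega
      have hmb2 : mid < high := by omega
      have hcond : nums.foldl (fun c num => if low ≤ num ∧ num ≤ mid then c + 1 else c) (0 : Int)
          = PySem.List.pyGetD pref mid 0 - PySem.List.pyGetD pref (low - 1) 0 := by
        rw [foldl_if_count, hpref mid (by omega) (by omega), hpref (low - 1) (by omega) (by omega),
            prefC_split nums low mid (by omega) (by omega)]
        ring
      rw [← hcond]
      by_cases hc : nums.foldl (fun c num => if low ≤ num ∧ num ≤ mid then c + 1 else c) (0 : Int) > mid - low + 1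
      · rw [if_pos hc, if_pos hc]
        exact ih low mid (by omega) h1 (by omega)
      · rw [if_neg hc, if_neg hc]
        exact ih (mid + 1) high (by omega) (by omega) h2
    · rw [ac14Loop, altLoop, dif_neg hlt, dif_neg hlt]

-- ===== VERDICT (by name: the statement is the Claim_ definition above) =====
theorem ac_14_spec : Claim_equal_ac_14 := by
  unfold Claim_equal_ac_14
  intro nums _
  unfold Spec_ac_14 ac_14 ac_14_alt
  set n : Int := (nums.length : Int) - 1 with hn
  by_cases h2 : 1 < n
  · have hn0 : 0 ≤ n := by omega
    have hpref : ∀ j : Int, 0 ≤ j → j ≤ n →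
        PySem.List.pyGetD (altPref (altCnt nums n) n).2 j 0 = prefC nums j := by
      intro j hj1 hj2
      have hcast : ((n.toNat : Int)) = n := by omega
      have hs := altPref_spec nums n hn0 n.toNat (by omega)
      rw [hcast] at hs
      unfold altPref
      rw [hs]
      exact PySem.List.pyGetD_map_pyRange_of_nonneg _ (n + 1) j 0 hj1 (by omega)
    exact loop_eq nums (altPref (altCnt nums n) n).2 n hpref (n - 1).toNat 1 n (by omega) (by omega) (by omega)
  · have hlt : ¬ (1 : Int) < n := h2
    rw [ac14Loop, altLoop, dif_neg hlt, dif_neg hlt]
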